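-- pv_equiv track=rewrite | github.com/InformaticsGenomicMedicine/FHIR-MolDef-python | src/moldeftranslator/allele_translator.py | _detect_sequence_type
-- ===== SOURCE A (Python) =====
-- def _detect_sequence_type(sequence_id: str) -> str:
--     """Translate the prefix of the RefSeq identifier to the type of sequence.
--
--     Args:
--         sequence_id (str): The RefSeq identifier.
--
--     Raises:
--         ValueError: If the prefix doesn't match any known sequence type.
--
--     Returns:
--         str: The type of sequence
--
--     """
--     prefix_to_type = {
--         "NC_": "DNA",
--         "NG_": "DNA",
--         "NM_": "RNA",
--         "NR_": "RNA",
--         "NP_": "protein",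
--     }
--
--     for prefix, seq_type in prefix_to_type.items():
--         if sequence_id.startswith(prefix):
--             return seq_type
--
--     raise ValueError(f"Unknown sequence type for input: {sequence_id}")
-- ===== SOURCE B (Python) =====
-- def _detect_sequence_type(sequence_id: str) -> str:
--     """Translate the prefix of the RefSeq identifier to the type of sequence.
--
--     Character decision tree: every known prefix has the same fixed shape, so check that
--     shape once and branch on the single distinguishing second character.
--     """
--     if len(sequence_id) >= 3 and sequence_id[0] == "N" and sequence_id[2] == "_":
--         c = sequence_id[1]
--         if c == "C" or c == "G":
--             return "DNA"
--         if c == "M" or c == "R":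
--             return "RNA"
--         if c == "P":
--             return "protein"
--     raise ValueError(f"Unknown sequence type for input: {sequence_id}")
-- ===== Notes on version B (the rewrite author's own statement) =====
-- stated objective: alternative
-- what changed: Replaces the scan over a prefix->type dict with a character decision tree: one fixed shape check on characters 0 and 2, then a branch on the distinguishing second character.
import Mathlib
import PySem

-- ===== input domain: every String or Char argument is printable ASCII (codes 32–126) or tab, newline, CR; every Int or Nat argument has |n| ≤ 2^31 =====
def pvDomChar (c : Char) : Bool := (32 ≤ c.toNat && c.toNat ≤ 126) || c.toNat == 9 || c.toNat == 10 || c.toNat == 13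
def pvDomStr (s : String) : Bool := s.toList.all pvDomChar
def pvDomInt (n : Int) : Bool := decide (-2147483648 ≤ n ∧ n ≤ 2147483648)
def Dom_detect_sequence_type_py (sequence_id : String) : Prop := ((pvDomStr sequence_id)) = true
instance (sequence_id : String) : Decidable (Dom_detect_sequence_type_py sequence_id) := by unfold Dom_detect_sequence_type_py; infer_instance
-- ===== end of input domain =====

-- B replaces A's scan over the prefix→type dict with a character decision tree:
-- one fixed shape check on characters 0 and 2, then a branch on the second character (objective: alternative).

-- ===== PORT A =====
-- the prefix→type table, in A's insertion order
def pvATab : List (String × String) :=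
  [("NC_", "DNA"), ("NG_", "DNA"), ("NM_", "RNA"), ("NR_", "RNA"), ("NP_", "protein")]

-- A's 'for prefix, seq_type in prefix_to_type.items(): if sequence_id.startswith(prefix): return seq_type'
def pvALoop (s : String) : List (String × String) → Option String
  | [] => none
  | (p, t) :: rest => if PySem.Str.startswith s p then some t else pvALoop s rest

def detect_sequence_type_py (sequence_id : String) : String :=
  (pvALoop sequence_id pvATab).getD ""   -- none = the final 'raise ValueError', excluded by Pre_

-- ===== PORT B =====
-- B: 'if len(s) >= 3 and s[0] == "N" and s[2] == "_": branch on s[1]'; the raise is excluded by Pre_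
def detect_sequence_type_py_alt (sequence_id : String) : String :=
  if PySem.Str.len sequence_id ≥ 3 ∧
     PySem.Str.pyGet? sequence_id 0 = some 'N' ∧
     PySem.Str.pyGet? sequence_id 2 = some '_' then
    match PySem.Str.pyGet? sequence_id 1 with
    | some c =>
      if c = 'C' ∨ c = 'G' then "DNA"
      else if c = 'M' ∨ c = 'R' then "RNA"
      else if c = 'P' then "protein"
      else ""   -- raise ValueError, excluded by Pre_
    | none => ""   -- unreachable under the length guard
  else ""   -- raise ValueError, excluded by Pre_

-- ===== PRECONDITION & SPEC =====
-- Pre_ excludes exactly the inputs on which A (and B) raise ValueError: those not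
-- starting with one of the five known RefSeq prefixes.
def Pre_detect_sequence_type_py (sequence_id : String) : Prop :=
  PySem.Str.startswith sequence_id "NC_" = true ∨
  PySem.Str.startswith sequence_id "NG_" = true ∨
  PySem.Str.startswith sequence_id "NM_" = true ∨
  PySem.Str.startswith sequence_id "NR_" = true ∨
  PySem.Str.startswith sequence_id "NP_" = true
instance (sequence_id : String) : Decidable (Pre_detect_sequence_type_py sequence_id) := by
  unfold Pre_detect_sequence_type_py; infer_instance

def pvWitness_detect_sequence_type_py : String := "NC_000001.11"

def Spec_detect_sequence_type_py (sequence_id : String) (out : String) : Prop :=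
  out = detect_sequence_type_py_alt sequence_id
instance (sequence_id : String) (out : String) : Decidable (Spec_detect_sequence_type_py sequence_id out) := by
  unfold Spec_detect_sequence_type_py; infer_instance

-- ===== CLAIM =====
def Claim_equal_detect_sequence_type_py : Prop :=
  ∀ (sequence_id : String), Dom_detect_sequence_type_py sequence_id →
    Pre_detect_sequence_type_py sequence_id →
    Spec_detect_sequence_type_py sequence_id (detect_sequence_type_py sequence_id)

-- ===== LEMMAS AND PROOFS =====

-- ===== VERDICT =====
theorem detect_sequence_type_py_spec : Claim_equal_detect_sequence_type_py := by
  intro s _ h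
  unfold Spec_detect_sequence_type_py
  rcases h with h | h | h | h | h <;>
    · simp only [PySem.Str.startswith_eq, PySem.Chars.startswith_iff] at h
      obtain ⟨rest, hr⟩ := h
      simp [detect_sequence_type_py, detect_sequence_type_py_alt, pvALoop, pvATab,
        PySem.Str.startswith_eq, PySem.Chars.startswith, PySem.Str.len_eq,
        PySem.Str.pyGet?_eq, PySem.List.pyGet?, PySem.List.pyIdx?, ← hr]
      have h0 : (2:Int) ≤ (rest.length:Int) + 1 + 1 := by omega
      have h1 : (0:Int) ≤ (rest.length:Int) + 1 := by omega
      have h2 : (0:Int) ≤ (rest.length:Int) + 1 + 1 := by omega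
      have h3 : (3:Int) ≤ (rest.length:Int) + 1 + 1 + 1 := by omega
      simp [h0, h1, h2, h3]
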